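-- pv_equiv track=rewrite | github.com/Rhod1um/python_eksamen_it-sikkerhed | man_1.py | my_answer34
-- ===== SOURCE A (Python) =====
-- def my_answer34(my_var):
--     room = 0
--     floor = 0
--     for i in my_var:
--         if i == "^":
--             floor = floor + 1
--         if i == "v":
--             floor = floor - 1
--         if i == ">":
--             room = room + 1
--         if i == "<":
--             room = room - 1
--     return (floor, room)
-- ===== SOURCE B (Python) =====
-- def my_answer34(my_var):
--     return (my_var.count("^") - my_var.count("v"),
--             my_var.count(">") - my_var.count("<"))
-- ===== Notes on version B (the rewrite author's own statement) =====
-- stated objective: faster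
-- what changed: Replaced the single-pass four-counter Python loop with four independent str.count scans combined arithmetically into the (floor, room) tuple.
import Mathlib
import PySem

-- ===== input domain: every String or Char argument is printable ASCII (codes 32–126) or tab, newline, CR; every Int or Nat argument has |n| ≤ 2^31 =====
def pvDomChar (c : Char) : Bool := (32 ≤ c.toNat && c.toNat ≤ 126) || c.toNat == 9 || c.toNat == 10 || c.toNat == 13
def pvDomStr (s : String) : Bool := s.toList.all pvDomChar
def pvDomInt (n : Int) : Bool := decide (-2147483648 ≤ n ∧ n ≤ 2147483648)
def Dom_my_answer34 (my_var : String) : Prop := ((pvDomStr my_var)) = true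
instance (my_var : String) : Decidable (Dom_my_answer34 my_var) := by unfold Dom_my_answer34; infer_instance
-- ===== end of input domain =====

-- B replaces A's single-pass four-counter loop by four independent str.count scans (idiomatic decomposition; same O(n) cost).


-- ===== PORT A =====
-- state is (room, floor) in declaration order; the loop updates them per char; returns (floor, room)
def my_answer34 (my_var : String) : Int × Int :=
  let st := my_var.toList.foldl
    (fun (s : Int × Int) (i : Char) =>
      let s := if i == '^' then (s.1, s.2 + 1) else s
      let s := if i == 'v' then (s.1, s.2 - 1) else s
      let s := if i == '>' then (s.1 + 1, s.2) else s
      let s := if i == '<' then (s.1 - 1, s.2) else s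
      s) ((0 : Int), (0 : Int))
  (st.2, st.1)

-- ===== PORT B =====
def my_answer34_alt (my_var : String) : Int × Int :=
  ((PySem.Str.count my_var "^" : Int) - (PySem.Str.count my_var "v" : Int),
   (PySem.Str.count my_var ">" : Int) - (PySem.Str.count my_var "<" : Int))

-- ===== PRECONDITION & SPEC =====
def Spec_my_answer34 (my_var : String) (out : Int × Int) : Prop := out = my_answer34_alt my_var
instance (my_var : String) (out : Int × Int) : Decidable (Spec_my_answer34 my_var out) := by unfold Spec_my_answer34; infer_instance

-- ===== CLAIM (what is proved, stated in full; the proofs are below) =====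
def Claim_equal_my_answer34 : Prop := ∀ (my_var : String), Dom_my_answer34 my_var → Spec_my_answer34 my_var (my_answer34 my_var)

-- ===== LEMMAS AND PROOFS =====

-- Python s.count(c) for a single-character needle is List.count
theorem chars_count_go_single (c : Char) (l : List Char) (acc : Nat) :
    PySem.Chars.count.go [c] l.length l acc = acc + l.count c := by
  induction l generalizing acc with
  | nil => simp [PySem.Chars.count.go]
  | cons h t ih =>
      simp only [List.length_cons, PySem.Chars.count.go]
      by_cases hc : h = c
      · subst hc
        simp [List.isPrefixOf, ih]
        omega
      · have : [c].isPrefixOf (h :: t) = false := by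
          simp [List.isPrefixOf]
          exact fun h' => absurd h'.symm hc
        simp [this, ih, hc]

theorem str_count_single (s : String) (c : Char) :
    PySem.Str.count s (String.ofList [c]) = s.toList.count c := by
  rw [PySem.Str.count_eq]
  rw [show (String.ofList [c]).toList = [c] from String.toList_ofList]
  unfold PySem.Chars.count
  simp only [List.isEmpty_cons, if_false, Bool.false_eq_true]
  rw [chars_count_go_single]
  simp

-- the loop invariant: A's fold adds the four counts to the accumulators
theorem foldA_eq (l : List Char) (r f : Int) :
    l.foldl
      (fun (s : Int × Int) (i : Char) =>
        let s := if i == '^' then (s.1, s.2 + 1) else s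
        let s := if i == 'v' then (s.1, s.2 - 1) else s
        let s := if i == '>' then (s.1 + 1, s.2) else s
        let s := if i == '<' then (s.1 - 1, s.2) else s
        s) (r, f)
    = (r + l.count '>' - l.count '<', f + l.count '^' - l.count 'v') := by
  induction l generalizing r f with
  | nil => simp
  | cons h t ih =>
      simp only [List.foldl_cons]
      by_cases h1 : h = '^' <;> by_cases h2 : h = 'v' <;> by_cases h3 : h = '>' <;>
        by_cases h4 : h = '<' <;>
        simp_all [Prod.ext_iff] <;> omega

-- ===== VERDICT (by name: the statement is the Claim_ definition above) =====
theorem my_answer34_spec : Claim_equal_my_answer34 := by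
  intro s _
  show _ = _
  unfold my_answer34 my_answer34_alt
  have h1 := str_count_single s '^'
  have h2 := str_count_single s 'v'
  have h3 := str_count_single s '>'
  have h4 := str_count_single s '<'
  simp only [foldA_eq]
  have e1 : ("^" : String) = String.ofList ['^'] := rfl
  have e2 : ("v" : String) = String.ofList ['v'] := rfl
  have e3 : (">" : String) = String.ofList ['>'] := rfl
  have e4 : ("<" : String) = String.ofList ['<'] := rfl
  rw [e1, e2, e3, e4, h1, h2, h3, h4]
  simp
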